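-- pv_equiv track=rewrite | github.com/matirojasg/nestednereval | nestednereval/metrics.py | get_nestings_per_level
-- ===== SOURCE A (Python) =====
-- from collections import defaultdict
--
-- def get_nestings_per_level(nestings):
--   nestings_per_level = defaultdict(list)
--
--   for nesting in nestings:
--     entities_level = defaultdict(list)
--     lvl = 0
--     while(len(nesting)!=0):
--       for entity1 in nesting:
--         is_nested = False
--
--         for entity2 in nesting:
--           if entity1!=entity2:
--             if (entity1[1]>entity2[1] and entity1[2]<=entity2[2]) or (entity1[1]>=entity2[1] and entity1[2]<entity2[2]):
--
--               is_nested = True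
--
--         if not is_nested:
--           entities_level[lvl].append(entity1)
--
--       for e in entities_level[lvl]:
--         nesting.remove(e)
--       lvl+=1
--
--
--     for k, v in entities_level.items():
--       if k==0:
--         for e in v:
--           nestings_per_level[0].append(e)
--       else:
--         for e in v:
--           nestings_per_level[1].append(e)
--
--
--   return nestings_per_level
-- ===== SOURCE B (Python) =====
-- def get_nestings_per_level(nestings):
--     # NOTE: unlike the original, this does not mutate the inner lists.
--     out0, out1, seen = [], [], False
--     for nesting in nestings:
--         if len(nesting) == 0:
--             continue
--         seen = True
--         # longest spans first: any strict container of a span comes earlier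
--         order = sorted(nesting, key=lambda t: t[1] - t[2])
--         lv = {}  # span -> nesting depth (longest strict-containment chain above it)
--         for t in order:
--             s, e = t[1], t[2]
--             best = 0
--             for (s2, e2), v in lv.items():
--                 if (s > s2 and e <= e2) or (s >= s2 and e < e2):
--                     best = max(best, v + 1)
--             lv[(s, e)] = best
--         out0.extend(t for t in nesting if lv[(t[1], t[2])] == 0)
--         maxlv = max(lv.values())
--         for l in range(1, maxlv + 1):
--             out1.extend(t for t in nesting if lv[(t[1], t[2])] == l)
--     if not seen:
--         return {}
--     res = {0: out0}
--     if out1: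
--         res[1] = out1
--     return res
-- ===== Notes on version B (the rewrite author's own statement) =====
-- stated objective: faster
-- what changed: Instead of repeatedly re-scanning and destructively peeling off the outermost entities level by level (O(levels*n^2) per nesting, mutating the input), B sorts the entities once by span length and computes each span's nesting depth with a single dynamic-programming pass (longest strict-containment chain), then emits level-0 entities and the deeper entities grouped by level in one pass.
import Mathlib
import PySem

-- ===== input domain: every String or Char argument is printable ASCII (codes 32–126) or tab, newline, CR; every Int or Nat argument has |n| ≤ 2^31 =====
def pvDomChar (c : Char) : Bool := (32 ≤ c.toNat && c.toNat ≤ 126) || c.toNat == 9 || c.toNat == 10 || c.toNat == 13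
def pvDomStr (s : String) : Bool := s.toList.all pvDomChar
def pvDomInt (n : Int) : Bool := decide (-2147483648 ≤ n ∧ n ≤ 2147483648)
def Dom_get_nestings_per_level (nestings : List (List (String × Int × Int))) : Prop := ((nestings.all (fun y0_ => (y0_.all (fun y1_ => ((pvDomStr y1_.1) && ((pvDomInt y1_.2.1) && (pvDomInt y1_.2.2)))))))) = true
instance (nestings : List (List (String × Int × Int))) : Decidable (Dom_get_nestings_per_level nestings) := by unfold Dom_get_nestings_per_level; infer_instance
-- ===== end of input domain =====

-- B replaces A's destructive level-by-level peeling with one sort by span length plus a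
-- quadratic longest-containment-chain DP; equivalence is about the RETURN value only
-- (A empties the input's inner lists in place, B does not mutate its argument).

-- the strict-containment test '(s1>s2 and e1<=e2) or (s1>=s2 and e1<e2)' shared verbatim by both sources
def pvInside (p q : Int × Int) : Bool :=
  (decide (p.1 > q.1) && decide (p.2 ≤ q.2)) || (decide (p.1 ≥ q.1) && decide (p.2 < q.2))

def pvSp (t : String × Int × Int) : Int × Int := (t.2.1, t.2.2)

-- ===== PORT A =====

-- inner 'for entity2 in nesting: … is_nested = True' flag loop
def pvIsNested (e1 : String × Int × Int) (nesting : List (String × Int × Int)) : Bool :=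
  nesting.foldl (fun b e2 => b || (decide (e1 ≠ e2) && pvInside (pvSp e1) (pvSp e2))) false

-- the 'while len(nesting)!=0' peeling loop; fuel is only a totalization guard: each pass
-- removes at least one entity, so fuel = |nesting| is never exhausted
def pvPeel (fuel : Nat) (nesting : List (String × Int × Int)) (lvl : Int)
    (el : PySem.Dict Int (List (String × Int × Int))) : PySem.Dict Int (List (String × Int × Int)) :=
  match fuel with
  | 0 => el
  | fuel + 1 =>
    if nesting.length ≠ 0 then
      -- 'for entity1 in nesting: … entities_level[lvl].append(entity1)'
      let el' := nesting.foldl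
        (fun d e1 => if !(pvIsNested e1 nesting) then d.modify lvl [] (· ++ [e1]) else d) el
      -- 'for e in entities_level[lvl]: nesting.remove(e)' (the key lvl is always populated here)
      let nesting' := (el'.getD lvl []).foldl (fun ns e => (PySem.List.remove? ns e).getD ns) nesting
      pvPeel fuel nesting' (lvl + 1) el'
    else el

-- 'for k, v in entities_level.items(): …'
def pvCollect (npl : PySem.Dict Int (List (String × Int × Int)))
    (el : PySem.Dict Int (List (String × Int × Int))) : PySem.Dict Int (List (String × Int × Int)) :=
  el.items.foldl (fun d kv =>
    if kv.1 == 0 then kv.2.foldl (fun d e => d.modify 0 [] (· ++ [e])) d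
    else kv.2.foldl (fun d e => d.modify 1 [] (· ++ [e])) d) npl

def get_nestings_per_level (nestings : List (List (String × Int × Int))) :
    List (Int × List (String × Int × Int)) :=
  (nestings.foldl (fun npl nesting =>
      pvCollect npl (pvPeel nesting.length nesting 0 PySem.Dict.empty)) PySem.Dict.empty).items

-- ===== PORT B =====

-- the DP pass: depth of each span = longest strict-containment chain above it,
-- filled in sorted order (containers come earlier)
def pvLevels (order : List (String × Int × Int)) : PySem.Dict (Int × Int) Int :=
  order.foldl (fun lv t =>
    let best := lv.items.foldl (fun b p => if pvInside (pvSp t) p.1 then max b (p.2 + 1) else b) 0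
    lv.insert (pvSp t) best) PySem.Dict.empty

-- body of B's 'for nesting in nestings' loop; state = (out0, out1, seen)
def pvStepB (st : List (String × Int × Int) × List (String × Int × Int) × Bool)
    (nesting : List (String × Int × Int)) :
    List (String × Int × Int) × List (String × Int × Int) × Bool :=
  if nesting.length == 0 then st else
    let lv := pvLevels (PySem.List.sorted nesting (fun t => t.2.1 - t.2.2) false)
    let out0 := st.1 ++ nesting.filter (fun t => lv.getD (pvSp t) 0 == 0)
    -- 'maxlv = max(lv.values())': lv is nonempty here
    let maxlv := (PySem.List.max? lv.values (fun v => v)).getD 0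
    let out1 := (PySem.List.pyRange 1 (maxlv + 1) 1).foldl
      (fun o1 l => o1 ++ nesting.filter (fun t => lv.getD (pvSp t) 0 == l)) st.2.1
    (out0, out1, true)

def get_nestings_per_level_alt (nestings : List (List (String × Int × Int))) :
    List (Int × List (String × Int × Int)) :=
  let st := nestings.foldl pvStepB ([], [], false)
  if st.2.2 = false then []
  else (if st.2.1.isEmpty then (PySem.Dict.empty.insert 0 st.1)
        else ((PySem.Dict.empty.insert 0 st.1).insert 1 st.2.1)).items

-- ===== PRECONDITION & SPEC =====
def Spec_get_nestings_per_level (nestings : List (List (String × Int × Int))) (out : List (Int × List (String × Int × Int))) : Prop := out = get_nestings_per_level_alt nestings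
instance (nestings : List (List (String × Int × Int))) (out : List (Int × List (String × Int × Int))) : Decidable (Spec_get_nestings_per_level nestings out) := by unfold Spec_get_nestings_per_level; infer_instance

-- ===== CLAIM (what is proved, stated in full; the proofs are below) =====
def Claim_equal_get_nestings_per_level : Prop := ∀ (nestings : List (List (String × Int × Int))), Dom_get_nestings_per_level nestings → Spec_get_nestings_per_level nestings (get_nestings_per_level nestings)

-- ===== LEMMAS AND PROOFS =====

-- basic order facts about strict span containment
theorem pvInside_irrefl (p : Int × Int) : pvInside p p = false := by
  simp [pvInside]

theorem pvInside_trans {p q r : Int × Int} (h1 : pvInside p q = true) (h2 : pvInside q r = true) :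
    pvInside p r = true := by
  simp [pvInside] at *; omega

-- containment strictly shrinks the sort key s - e
theorem pvInside_key {p q : Int × Int} (h : pvInside p q = true) : q.1 - q.2 < p.1 - p.2 := by
  simp [pvInside] at h; omega

theorem pv_countP_lt {α : Type} (l : List α) (p q : α → Bool) (h : ∀ x ∈ l, p x = true → q x = true)
    (w : α) (hw : w ∈ l) (hq : q w = true) (hp : p w = false) : l.countP p < l.countP q := by
  induction l with
  | nil => cases hw
  | cons a t ih =>
    rcases List.mem_cons.mp hw with rfl | hw'
    · have h1 : t.countP p ≤ t.countP q :=
        List.countP_mono_left (fun x hx => h x (List.mem_cons_of_mem _ hx))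
      simp [hp, hq]; omega
    · have h1 := ih (fun x hx => h x (List.mem_cons_of_mem _ hx)) hw'
      by_cases hpa : p a = true
      · have hqa := h a (List.mem_cons_self) hpa
        simp [hpa, hqa]; omega
      · simp only [Bool.not_eq_true] at hpa
        simp [List.countP_cons, hpa]; omega

-- nesting depth of a span: longest strict-containment chain above it in S
def pvClev (S : List (Int × Int)) (p : Int × Int) : Nat :=
  ((S.filter (fun q => pvInside p q)).attach.map (fun q => pvClev S q.1 + 1)).foldl max 0
termination_by (S.filter (fun q => pvInside p q)).length
decreasing_by
  have hmem := q.2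
  have hins : pvInside p q.1 = true := (List.mem_filter.mp hmem).2
  have : ∀ x ∈ S, pvInside q.1 x = true → pvInside p x = true := fun x _ h2 => pvInside_trans hins h2
  simpa [← List.countP_eq_length_filter] using
    pv_countP_lt S (fun r => pvInside q.1 r) (fun r => pvInside p r) (fun x hx => this x hx)
      q.1 (List.mem_filter.mp hmem).1 hins (pvInside_irrefl q.1)

def pvMaxN (l : List Nat) : Nat := l.foldl max 0

theorem pv_foldl_max_init (l : List Nat) (a : Nat) : a ≤ l.foldl max a := by
  induction l generalizing a with
  | nil => simp
  | cons x t ih => exact le_trans (le_max_left a x) (ih (max a x))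

theorem pv_le_maxN_gen {l : List Nat} {x : Nat} (a : Nat) (hx : x ∈ l) : x ≤ l.foldl max a := by
  induction l generalizing a with
  | nil => cases hx
  | cons y t ih =>
    rcases List.mem_cons.mp hx with rfl | h
    · exact le_trans (le_max_right a x) (pv_foldl_max_init t (max a x))
    · exact ih (max a y) h

theorem pv_le_maxN {l : List Nat} {x : Nat} (hx : x ∈ l) : x ≤ pvMaxN l :=
  pv_le_maxN_gen 0 hx

theorem pv_maxN_le_gen {l : List Nat} {a b : Nat} (ha : a ≤ b) (h : ∀ x ∈ l, x ≤ b) :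
    l.foldl max a ≤ b := by
  induction l generalizing a with
  | nil => simpa
  | cons y t ih =>
    exact ih (max_le ha (h y List.mem_cons_self)) (fun x hx => h x (List.mem_cons_of_mem _ hx))

theorem pv_maxN_le {l : List Nat} {b : Nat} (h : ∀ x ∈ l, x ≤ b) : pvMaxN l ≤ b :=
  pv_maxN_le_gen (Nat.zero_le b) h

theorem pv_foldl_max_mem_or (l : List Nat) (a : Nat) : l.foldl max a = a ∨ l.foldl max a ∈ l := by
  induction l generalizing a with
  | nil => simp
  | cons y t ih =>
    rcases ih (max a y) with h | h
    · rw [List.foldl_cons, h]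
      rcases max_choice a y with hm | hm
      · left; exact hm
      · right; rw [hm]; exact List.mem_cons_self
    · right; rw [List.foldl_cons]; exact List.mem_cons_of_mem _ h

theorem pv_maxN_mem_or (l : List Nat) : pvMaxN l = 0 ∨ pvMaxN l ∈ l :=
  pv_foldl_max_mem_or l 0

theorem pvClev_eq (S : List (Int × Int)) (p : Int × Int) :
    pvClev S p = pvMaxN ((S.filter (fun q => pvInside p q)).map (fun q => pvClev S q + 1)) := by
  rw [pvClev, pvMaxN]
  congr 1
  rw [List.map_attach_eq_pmap]
  exact List.pmap_eq_map (p := fun q => q ∈ S.filter (fun q => pvInside p q))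
    (f := fun q => pvClev S q + 1) (l := S.filter (fun q => pvInside p q)) _

theorem pvClev_eq_zero_iff (S : List (Int × Int)) (p : Int × Int) :
    pvClev S p = 0 ↔ ∀ q ∈ S, pvInside p q = false := by
  rw [pvClev_eq]
  constructor
  · intro h q hq
    by_contra hne
    simp only [Bool.not_eq_false] at hne
    have hmem : pvClev S q + 1 ∈ (S.filter (fun q => pvInside p q)).map (fun q => pvClev S q + 1) :=
      List.mem_map_of_mem (List.mem_filter.mpr ⟨hq, hne⟩)
    have := pv_le_maxN hmem
    omega
  · intro h
    have : S.filter (fun q => pvInside p q) = [] :=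
      List.filter_eq_nil_iff.mpr (fun q hq => by simp [h q hq])
    simp [this, pvMaxN]

-- peeling the level-0 spans off S decrements every remaining depth
theorem pvClev_shift_aux (S : List (Int × Int)) : ∀ (n : Nat) (p : Int × Int),
    (S.filter (fun q => pvInside p q)).length ≤ n → 1 ≤ pvClev S p →
    pvClev (S.filter (fun q => decide (pvClev S q ≠ 0))) p = pvClev S p - 1 := by
  intro n
  induction n with
  | zero =>
    intro p hlen h
    exfalso
    have hnil : S.filter (fun q => pvInside p q) = [] := List.eq_nil_of_length_eq_zero (by omega)
    have : pvClev S p = 0 := by rw [pvClev_eq, hnil]; simp [pvMaxN]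
    omega
  | succ n ih =>
    intro p hlen h
    have hMeq : pvClev S p
        = pvMaxN ((S.filter (fun q => pvInside p q)).map (fun q => pvClev S q + 1)) := pvClev_eq S p
    have hlv : ∀ q ∈ S.filter (fun q => decide (pvClev S q ≠ 0)), pvClev S q ≠ 0 :=
      fun q hq => by simpa using (List.mem_filter.mp hq).2
    have hIH : ∀ q ∈ S.filter (fun q => decide (pvClev S q ≠ 0)), pvInside p q = true →
        pvClev (S.filter (fun q => decide (pvClev S q ≠ 0))) q = pvClev S q - 1 := by
      intro q hq hins
      apply ih q ?_ (Nat.one_le_iff_ne_zero.mpr (hlv q hq))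
      have hqS : q ∈ S := (List.mem_filter.mp hq).1
      have hlt : (S.filter (fun r => pvInside q r)).length < (S.filter (fun r => pvInside p r)).length := by
        simpa [← List.countP_eq_length_filter] using
          pv_countP_lt S (fun r => pvInside q r) (fun r => pvInside p r)
            (fun x _ h2 => pvInside_trans hins h2) q hqS hins (pvInside_irrefl q)
      omega
    apply le_antisymm
    · rw [pvClev_eq (S.filter (fun q => decide (pvClev S q ≠ 0))) p]
      apply pv_maxN_le
      intro x hx
      rcases List.mem_map.mp hx with ⟨q, hq, rfl⟩
      have hqS' : q ∈ S.filter (fun q => decide (pvClev S q ≠ 0)) := (List.mem_filter.mp hq).1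
      have hins : pvInside p q = true := (List.mem_filter.mp hq).2
      have h1 : pvClev S q + 1 ≤ pvClev S p := by
        rw [hMeq]
        exact pv_le_maxN (List.mem_map_of_mem
          (List.mem_filter.mpr ⟨(List.mem_filter.mp hqS').1, hins⟩))
      rw [hIH q hqS' hins]
      have := hlv q hqS'
      omega
    · rcases pv_maxN_mem_or ((S.filter (fun q => pvInside p q)).map (fun q => pvClev S q + 1))
        with h0 | hmem
      · omega
      · rcases List.mem_map.mp hmem with ⟨q0, hq0, heq⟩
        have hq0S : q0 ∈ S := (List.mem_filter.mp hq0).1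
        have hins0 : pvInside p q0 = true := (List.mem_filter.mp hq0).2
        by_cases hz : pvClev S q0 = 0
        · omega
        · have hq0S' : q0 ∈ S.filter (fun q => decide (pvClev S q ≠ 0)) :=
            List.mem_filter.mpr ⟨hq0S, by simpa using hz⟩
          have hmem2 : q0 ∈ (S.filter (fun q => decide (pvClev S q ≠ 0))).filter
              (fun q => pvInside p q) := List.mem_filter.mpr ⟨hq0S', hins0⟩
          have h2 := pv_le_maxN (List.mem_map_of_mem
            (f := fun q => pvClev (S.filter (fun q => decide (pvClev S q ≠ 0))) q + 1) hmem2)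
          simp only at h2
          rw [pvClev_eq (S.filter (fun q => decide (pvClev S q ≠ 0))) p]
          rw [hIH q0 hq0S' hins0] at h2
          omega

theorem pvClev_shift (S : List (Int × Int)) (p : Int × Int) (h : 1 ≤ pvClev S p) :
    pvClev (S.filter (fun q => decide (pvClev S q ≠ 0))) p = pvClev S p - 1 :=
  pvClev_shift_aux S (S.filter (fun q => pvInside p q)).length p le_rfl h

-- some span of a nonempty list has depth 0
theorem pvClev_exists_zero (S : List (Int × Int)) (h : S ≠ []) :
    ∃ q ∈ S, pvClev S q = 0 := by
  have hne : S.argmin (fun q : Int × Int => q.1 - q.2) ≠ none := by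
    simpa [List.argmin_eq_none] using h
  rcases Option.ne_none_iff_exists'.mp hne with ⟨m, hm⟩
  have hmm : m ∈ S.argmin (fun q : Int × Int => q.1 - q.2) := hm ▸ rfl
  refine ⟨m, List.argmin_mem hmm, ?_⟩
  rw [pvClev_eq_zero_iff]
  intro q hq
  by_contra hne
  simp only [Bool.not_eq_false] at hne
  have hkey := pvInside_key hne
  have := List.le_of_mem_argmin hq hmm
  simp only at this
  omega

-- entity-level depth
def pvClevE (ns : List (String × Int × Int)) (e : String × Int × Int) : Nat :=
  pvClev (ns.map pvSp) (pvSp e)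

-- ---- A-side characterization ----

theorem pv_foldl_or {α : Type} (f : α → Bool) (l : List α) (b : Bool) :
    l.foldl (fun b e => b || f e) b = (b || l.any f) := by
  induction l generalizing b with
  | nil => simp
  | cons a t ih => simp [List.foldl_cons, ih, Bool.or_assoc]

theorem pvIsNested_eq (e1 : String × Int × Int) (ns : List (String × Int × Int)) :
    pvIsNested e1 ns = ns.any (fun e2 => pvInside (pvSp e1) (pvSp e2)) := by
  rw [pvIsNested, pv_foldl_or]
  simp only [Bool.false_or]
  apply PySem.List.any_congr_mem
  intro e2 _
  by_cases h : e1 = e2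
  · subst h; simp [pvInside_irrefl]
  · simp [h]

-- 'not nested in the current list' is 'containment depth 0'
theorem pvIsNested_clev (e : String × Int × Int) (ns : List (String × Int × Int)) :
    (!pvIsNested e ns) = (pvClevE ns e == 0) := by
  rw [pvIsNested_eq, pvClevE]
  by_cases h : pvClev (ns.map pvSp) (pvSp e) = 0
  · have hall := (pvClev_eq_zero_iff (ns.map pvSp) (pvSp e)).mp h
    have : ns.any (fun e2 => pvInside (pvSp e) (pvSp e2)) = false := by
      simp only [List.any_eq_false]
      intro e2 he2
      simpa using hall (pvSp e2) (List.mem_map_of_mem he2)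
    simp [this, h]
  · have : ns.any (fun e2 => pvInside (pvSp e) (pvSp e2)) = true := by
      by_contra hfalse
      simp only [Bool.not_eq_true, List.any_eq_false] at hfalse
      apply h
      rw [pvClev_eq_zero_iff]
      intro q hq
      rcases List.mem_map.mp hq with ⟨e2, he2, rfl⟩
      simpa using hfalse e2 he2
    simp [this, h]

theorem pv_modify_modify {ν : Type} (d : PySem.Dict Int ν) (k : Int) (d0 : ν) (f g : ν → ν) :
    (d.modify k d0 f).modify k d0 g = d.modify k d0 (fun v => g (f v)) := by
  simp [PySem.Dict.modify, PySem.Dict.getD_insert_self, PySem.Dict.insert_insert_self]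

theorem pv_foldl_modify_filter {α : Type} (c : α → Bool) (k : Int) (ns : List α)
    (d : PySem.Dict Int (List α)) :
    ns.foldl (fun d e => if c e then d.modify k [] (· ++ [e]) else d) d
      = if ns.filter c = [] then d else d.modify k [] (· ++ ns.filter c) := by
  induction ns generalizing d with
  | nil => simp
  | cons a t ih =>
    by_cases hc : c a
    · rw [List.foldl_cons, if_pos hc, ih, List.filter_cons_of_pos hc]
      by_cases ht : t.filter c = []
      · simp [ht]
      · rw [if_neg ht, if_neg (by simp), pv_modify_modify]
        congr 1
        funext v
        simp
    · rw [List.foldl_cons, if_neg (by simp [hc]), ih, List.filter_cons_of_neg (by simp [hc])]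


theorem pv_remove_getD {α : Type} [BEq α] [LawfulBEq α] (xs : List α) (v : α) :
    (PySem.List.remove? xs v).getD xs = xs.erase v := by
  induction xs with
  | nil => rfl
  | cons a t ih =>
    by_cases hav : (a == v) = true
    · have hva : (v == a) = true := by rw [beq_iff_eq] at hav ⊢; exact hav.symm
      simp [PySem.List.remove?, List.idxOf?_cons, List.erase_cons, hav]
    · have hav' : (a == v) = false := by simpa using hav
      have hva : (v == a) = false := by
        rw [beq_eq_false_iff_ne] at hav' ⊢; exact fun h => hav' h.symm
      cases hio : List.idxOf? v t with
      | none =>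
        have hnm : v ∉ t := by
          intro hmem
          exact absurd hio (by simpa [List.idxOf?_eq_none_iff] using hmem)
        simp [PySem.List.remove?, List.idxOf?_cons, hva, hio, hav',
          List.erase_of_not_mem hnm]
      | some j =>
        have h1 : (PySem.List.remove? t v).getD t = t.eraseIdx j := by
          simp [PySem.List.remove?, hio]
        rw [h1] at ih
        simp [PySem.List.remove?, List.idxOf?_cons, hva, hio, hav',
          List.eraseIdx_cons_succ, ih]

theorem pv_foldl_erase_cons {α : Type} [BEq α] [LawfulBEq α] (R : List α) (a : α) (t : List α)
    (h : ∀ e ∈ R, e ≠ a) :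
    R.foldl (fun l e => l.erase e) (a :: t) = a :: R.foldl (fun l e => l.erase e) t := by
  induction R generalizing t with
  | nil => rfl
  | cons r R ih =>
    have har : (a == r) = false :=
      beq_eq_false_iff_ne.mpr (fun h' => (h r List.mem_cons_self) h'.symm)
    rw [List.foldl_cons, List.foldl_cons, List.erase_cons, if_neg (by simp [har])]
    exact ih (t.erase r) (fun e he => h e (List.mem_cons_of_mem _ he))

-- 'for e in entities_level[lvl]: nesting.remove(e)' removes exactly the level's entities
theorem pv_remove_filter {α : Type} [BEq α] [LawfulBEq α] (c : α → Bool) (ns : List α) :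
    (ns.filter c).foldl (fun l e => (PySem.List.remove? l e).getD l) ns
      = ns.filter (fun e => !c e) := by
  have hstep : (fun (l : List α) (e : α) => (PySem.List.remove? l e).getD l)
      = fun l e => l.erase e := by
    funext l e; exact pv_remove_getD l e
  rw [hstep]
  induction ns with
  | nil => rfl
  | cons a t ih =>
    by_cases hc : c a
    · rw [List.filter_cons_of_pos hc, List.foldl_cons, List.erase_cons_head,
        List.filter_cons_of_neg (by simp [hc]), ih]
    · rw [List.filter_cons_of_neg (by simp [hc]), List.filter_cons_of_pos (by simp [hc]),
        pv_foldl_erase_cons _ _ _ ?_, ih]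
      intro e he hea
      subst hea
      exact hc (List.of_mem_filter he)

-- the dictionary entities_level as a function of the input: one entry per level
def pvSpecItems (ns : List (String × Int × Int)) (lvl : Int) :
    List (Int × List (String × Int × Int)) :=
  if ns.isEmpty then [] else
    (List.range (pvMaxN (ns.map (pvClevE ns)) + 1)).map
      (fun (k : Nat) => (lvl + (k : Int), ns.filter (fun e => pvClevE ns e == k)))

theorem pv_filter_isNested (ns : List (String × Int × Int)) :
    ns.filter (fun e1 => !pvIsNested e1 ns) = ns.filter (fun e => pvClevE ns e == 0) := by
  exact List.filter_congr (fun e _ => pvIsNested_clev e ns)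

theorem pv_map_filter_sp (ns : List (String × Int × Int)) :
    (ns.filter (fun e => !(pvClevE ns e == 0))).map pvSp
      = (ns.map pvSp).filter (fun q => decide (pvClev (ns.map pvSp) q ≠ 0)) := by
  rw [List.filter_map]
  congr 1
  apply List.filter_congr
  intro e _
  simp only [Function.comp, pvClevE, Bool.beq_eq_decide_eq, decide_not]

theorem pvClevE_shift (ns : List (String × Int × Int)) (e : String × Int × Int)
    (h : pvClevE ns e ≠ 0) :
    pvClevE (ns.filter (fun e => !(pvClevE ns e == 0))) e = pvClevE ns e - 1 := by
  rw [pvClevE, pv_map_filter_sp, pvClev_shift _ _ (by rw [pvClevE] at h; omega)]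
  rfl

theorem pv_maxShift (ns : List (String × Int × Int)) (m : Nat)
    (hM : pvMaxN (ns.map (pvClevE ns)) = m + 1) :
    pvMaxN ((ns.filter (fun e => !(pvClevE ns e == 0))).map
      (pvClevE (ns.filter (fun e => !(pvClevE ns e == 0))))) = m := by
  have hmap : (ns.filter (fun e => !(pvClevE ns e == 0))).map
      (pvClevE (ns.filter (fun e => !(pvClevE ns e == 0))))
      = (ns.filter (fun e => !(pvClevE ns e == 0))).map (fun e => pvClevE ns e - 1) := by
    apply List.map_congr_left
    intro e he
    exact pvClevE_shift ns e (by simpa using (List.mem_filter.mp he).2)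
  rw [hmap]
  apply le_antisymm
  · apply pv_maxN_le
    intro x hx
    rcases List.mem_map.mp hx with ⟨e, he, rfl⟩
    have : pvClevE ns e ≤ m + 1 := by
      rw [← hM]
      exact pv_le_maxN (List.mem_map_of_mem (List.mem_filter.mp he).1)
    omega
  · rcases pv_maxN_mem_or (ns.map (pvClevE ns)) with h0 | hmem
    · omega
    · rw [hM] at hmem
      rcases List.mem_map.mp hmem with ⟨e0, he0, heq⟩
      have he0' : e0 ∈ ns.filter (fun e => !(pvClevE ns e == 0)) :=
        List.mem_filter.mpr ⟨he0, by simp [heq]⟩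
      have : pvClevE ns e0 - 1 ∈ (ns.filter (fun e => !(pvClevE ns e == 0))).map
          (fun e => pvClevE ns e - 1) := List.mem_map_of_mem he0'
      have h2 := pv_le_maxN this
      omega

theorem pv_filter_level_shift (ns : List (String × Int × Int)) (k : Nat) :
    (ns.filter (fun e => !(pvClevE ns e == 0))).filter
        (fun e => pvClevE (ns.filter (fun e => !(pvClevE ns e == 0))) e == k)
      = ns.filter (fun e => pvClevE ns e == k + 1) := by
  rw [List.filter_filter]
  apply List.filter_congr
  intro e _
  by_cases h0 : pvClevE ns e = 0
  · simp [h0]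
  · rw [pvClevE_shift ns e h0]
    rcases Nat.exists_eq_succ_of_ne_zero h0 with ⟨v, hv⟩
    rw [hv]
    simp

-- one peeling round, stated on pvSpecItems
theorem pvSpecItems_cons (ns : List (String × Int × Int)) (lvl : Int) (h : ns ≠ []) :
    pvSpecItems ns lvl = (lvl, ns.filter (fun e => pvClevE ns e == 0))
      :: pvSpecItems (ns.filter (fun e => !(pvClevE ns e == 0))) (lvl + 1) := by
  rcases hM : pvMaxN (ns.map (pvClevE ns)) with _ | m
  · -- every entity has depth 0: the filtered remainder is empty
    have hall : ∀ e ∈ ns, pvClevE ns e = 0 := by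
      intro e he
      have := pv_le_maxN (List.mem_map_of_mem (f := pvClevE ns) he)
      omega
    have hnil : ns.filter (fun e => !(pvClevE ns e == 0)) = [] := by
      apply List.filter_eq_nil_iff.mpr
      intro e he
      simp [hall e he]
    rw [pvSpecItems, if_neg (by simpa using h), hM, hnil]
    simp [pvSpecItems]
  · have hns' : ns.filter (fun e => !(pvClevE ns e == 0)) ≠ [] := by
      rcases pv_maxN_mem_or (ns.map (pvClevE ns)) with h0 | hmem
      · omega
      · rw [hM] at hmem
        rcases List.mem_map.mp hmem with ⟨e0, he0, heq⟩
        intro hnil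
        have : e0 ∈ ns.filter (fun e => !(pvClevE ns e == 0)) :=
          List.mem_filter.mpr ⟨he0, by simp [heq]⟩
        simp [hnil] at this
    rw [pvSpecItems, if_neg (by simpa using h), hM, List.range_succ_eq_map, List.map_cons,
      List.map_map, pvSpecItems, if_neg (by simpa using hns'), pv_maxShift ns m hM]
    congr 1
    · simp
    · apply List.map_congr_left
      intro k _
      simp only [Function.comp_apply, Nat.succ_eq_add_one]
      rw [pv_filter_level_shift ns k]
      simp only [Prod.mk.injEq]
      exact ⟨by push_cast; ring, trivial⟩

-- the peeling loop computes exactly pvSpecItems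
theorem pvPeel_items : ∀ (n : Nat) (ns : List (String × Int × Int)) (fuel : Nat) (lvl : Int)
    (el : PySem.Dict Int (List (String × Int × Int))), ns.length ≤ n → ns.length ≤ fuel →
    el.keys.Nodup → (∀ k ∈ el.keys, k < lvl) →
    (pvPeel fuel ns lvl el).items = el.items ++ pvSpecItems ns lvl := by
  intro n
  induction n with
  | zero =>
    intro ns fuel lvl el hn hf hnd hk
    have hns : ns = [] := List.eq_nil_of_length_eq_zero (by omega)
    subst hns
    cases fuel <;> simp [pvPeel, pvSpecItems]
  | succ n ih =>
    intro ns fuel lvl el hn hf hnd hk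
    by_cases hns : ns = []
    · subst hns; cases fuel <;> simp [pvPeel, pvSpecItems]
    · have hlen : 0 < ns.length := List.length_pos_iff.mpr hns
      cases fuel with
      | zero => omega
      | succ f =>
        have hcon : el.contains lvl = false := by
          cases hc : el.contains lvl
          · rfl
          · exact absurd (hk lvl ((PySem.Dict.contains_iff_mem_keys el lvl).mp hc)) (lt_irrefl lvl)
        have hL0ne : ns.filter (fun e => pvClevE ns e == 0) ≠ [] := by
          rcases pvClev_exists_zero (ns.map pvSp) (by simpa using hns) with ⟨q, hq, hq0⟩
          rcases List.mem_map.mp hq with ⟨e0, he0, rfl⟩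
          intro hnil
          have : e0 ∈ ns.filter (fun e => pvClevE ns e == 0) :=
            List.mem_filter.mpr ⟨he0, by simp [pvClevE, hq0]⟩
          simp [hnil] at this
        have hstep : pvPeel (f + 1) ns lvl el
            = pvPeel f (((ns.foldl (fun d e1 =>
                  if !(pvIsNested e1 ns) then d.modify lvl [] (· ++ [e1]) else d) el).getD lvl
                  []).foldl (fun ns e => (PySem.List.remove? ns e).getD ns) ns) (lvl + 1)
                (ns.foldl (fun d e1 =>
                  if !(pvIsNested e1 ns) then d.modify lvl [] (· ++ [e1]) else d) el) := by
          rw [pvPeel]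
          rw [if_pos (by simpa using hns)]
        have hfoldmod : ns.foldl (fun d e1 =>
              if !(pvIsNested e1 ns) then d.modify lvl [] (· ++ [e1]) else d) el
            = el.insert lvl (ns.filter (fun e => pvClevE ns e == 0)) := by
          rw [pv_foldl_modify_filter (fun e1 => !pvIsNested e1 ns) lvl ns el,
            pv_filter_isNested, if_neg hL0ne, PySem.Dict.modify,
            PySem.Dict.getD_of_not_contains el [] hcon]
          rw [List.nil_append]
        rw [hstep, hfoldmod, PySem.Dict.getD_insert_self,
          pv_remove_filter (fun e => pvClevE ns e == 0) ns]
        have hlt : (ns.filter (fun e => !(pvClevE ns e == 0))).length < ns.length := by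
          rcases List.ne_nil_iff_exists_cons.mp hL0ne with ⟨e0, t0, he0⟩
          have he0mem : e0 ∈ ns.filter (fun e => pvClevE ns e == 0) := by rw [he0]; exact List.mem_cons_self
          have h1 : ns.countP (fun e => !(pvClevE ns e == 0)) < ns.countP (fun _ => true) :=
            pv_countP_lt ns _ _ (fun x _ _ => rfl) e0 (List.mem_of_mem_filter he0mem)
              rfl (by simpa using List.of_mem_filter he0mem)
          simpa [← List.countP_eq_length_filter, List.countP_true] using h1
        rw [ih (ns.filter (fun e => !(pvClevE ns e == 0))) f (lvl + 1) _ (by omega) (by omega)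
            (PySem.Dict.nodup_keys_insert el lvl _ hnd)
            (by rw [PySem.Dict.keys_insert_of_not_contains _ _ hcon]
                intro k hkmem
                rcases List.mem_append.mp hkmem with hm | hm
                · exact lt_trans (hk k hm) (lt_add_one lvl)
                · simp at hm; omega)]
        rw [PySem.Dict.items_insert_of_not_contains el _ hcon,
          pvSpecItems_cons ns lvl hns, List.append_assoc]
        rfl

theorem pv_foldl_modify_append {α : Type} (v : List α) (k : Int) (d : PySem.Dict Int (List α)) :
    v.foldl (fun d e => d.modify k [] (· ++ [e])) d
      = if v = [] then d else d.modify k [] (· ++ v) := by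
  have h := pv_foldl_modify_filter (fun _ => true) k v d
  simpa using h

-- level-0 entities of a nesting, and the deeper entities grouped by level
def pvA0 (ns : List (String × Int × Int)) : List (String × Int × Int) :=
  ns.filter (fun e => pvClevE ns e == 0)

def pvA1 (ns : List (String × Int × Int)) : List (String × Int × Int) :=
  ((List.range (pvMaxN (ns.map (pvClevE ns)))).map
    (fun k => ns.filter (fun e => pvClevE ns e == k + 1))).flatten

theorem pvSpecItems_key_ge (ns : List (String × Int × Int)) (lvl : Int) :
    ∀ kv ∈ pvSpecItems ns lvl, lvl ≤ kv.1 := by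
  intro kv hkv
  rw [pvSpecItems] at hkv
  split at hkv
  · simp at hkv
  · rcases List.mem_map.mp hkv with ⟨k, _, rfl⟩
    simp

theorem pvCollect_rest (rest : List (Int × List (String × Int × Int)))
    (d : PySem.Dict Int (List (String × Int × Int))) (h : ∀ kv ∈ rest, kv.1 ≠ 0) :
    rest.foldl (fun d kv => if kv.1 == 0 then kv.2.foldl (fun d e => d.modify 0 [] (· ++ [e])) d
      else kv.2.foldl (fun d e => d.modify 1 [] (· ++ [e])) d) d
    = if (rest.map (·.2)).flatten = [] then d
      else d.modify 1 [] (· ++ (rest.map (·.2)).flatten) := by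
  induction rest generalizing d with
  | nil => simp
  | cons kv rest ih =>
    obtain ⟨k1, v1⟩ := kv
    rw [List.foldl_cons, if_neg (by simpa using h (k1, v1) List.mem_cons_self),
      pv_foldl_modify_append v1 1 d, ih _ (fun x hx => h x (List.mem_cons_of_mem _ hx))]
    by_cases hv : v1 = []
    · subst hv; simp
    · by_cases hrest : (rest.map (·.2)).flatten = []
      · simp [hv, hrest]
      · rw [if_neg hv, if_neg hrest, if_neg (by simp [hv]), pv_modify_modify]
        congr 1
        funext w
        simp

theorem pvSpec_tail_values (ns : List (String × Int × Int)) :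
    (pvSpecItems (ns.filter (fun e => !(pvClevE ns e == 0))) 1).map (·.2)
      = (List.range (pvMaxN (ns.map (pvClevE ns)))).map
          (fun k => ns.filter (fun e => pvClevE ns e == k + 1)) := by
  rcases hM : pvMaxN (ns.map (pvClevE ns)) with _ | m
  · have hnil : ns.filter (fun e => !(pvClevE ns e == 0)) = [] := by
      apply List.filter_eq_nil_iff.mpr
      intro e he
      have := pv_le_maxN (List.mem_map_of_mem (f := pvClevE ns) he)
      simp
      omega
    rw [hnil]
    simp [pvSpecItems]
  · have hns' : ns.filter (fun e => !(pvClevE ns e == 0)) ≠ [] := by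
      rcases pv_maxN_mem_or (ns.map (pvClevE ns)) with h0 | hmem
      · omega
      · rw [hM] at hmem
        rcases List.mem_map.mp hmem with ⟨e0, he0, heq⟩
        intro hnil
        have : e0 ∈ ns.filter (fun e => !(pvClevE ns e == 0)) :=
          List.mem_filter.mpr ⟨he0, by simp [heq]⟩
        simp [hnil] at this
    rw [pvSpecItems, if_neg (by simpa using hns'), pv_maxShift ns m hM, List.map_map]
    apply List.map_congr_left
    intro k _
    simp only [Function.comp_apply]
    exact pv_filter_level_shift ns k

-- the whole body of A's outer loop, as a function of the nesting
theorem pvStepA (npl : PySem.Dict Int (List (String × Int × Int)))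
    (ns : List (String × Int × Int)) :
    pvCollect npl (pvPeel ns.length ns 0 PySem.Dict.empty)
      = if ns = [] then npl
        else (if pvA1 ns = [] then npl.modify 0 [] (· ++ pvA0 ns)
              else (npl.modify 0 [] (· ++ pvA0 ns)).modify 1 [] (· ++ pvA1 ns)) := by
  have hitems := pvPeel_items ns.length ns ns.length 0 PySem.Dict.empty le_rfl le_rfl
    (by simp [PySem.Dict.empty]) (by simp [PySem.Dict.empty])
  by_cases hns : ns = []
  · subst hns
    simp [pvCollect, pvPeel, pvSpecItems, PySem.Dict.empty]
  · rw [if_neg hns, pvCollect, hitems]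
    rw [pvSpecItems_cons ns 0 hns]
    have hL0ne : pvA0 ns ≠ [] := by
      rcases pvClev_exists_zero (ns.map pvSp) (by simpa using hns) with ⟨q, hq, hq0⟩
      rcases List.mem_map.mp hq with ⟨e0, he0, rfl⟩
      intro hnil
      have : e0 ∈ pvA0 ns := List.mem_filter.mpr ⟨he0, by simp [pvClevE, hq0]⟩
      simp [hnil] at this
    have hemp : (PySem.Dict.empty : PySem.Dict Int (List (String × Int × Int))).items = [] := rfl
    rw [hemp, List.nil_append, List.foldl_cons, if_pos (by simp),
      show ((0 : Int), ns.filter (fun e => pvClevE ns e == 0)).2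
        = pvA0 ns from rfl,
      pv_foldl_modify_append (pvA0 ns) 0 npl, if_neg hL0ne,
      pvCollect_rest _ _ (fun kv hkv => by have := pvSpecItems_key_ge _ 1 kv hkv; omega)]
    rw [show ((0 : Int) + 1) = 1 by norm_num]
    have hflat : ((pvSpecItems (ns.filter (fun e => !(pvClevE ns e == 0))) 1).map (·.2)).flatten
        = pvA1 ns := by rw [pvSpec_tail_values ns]; rfl
    rw [hflat]

-- ---- B-side characterization ----

def pvMaxI (l : List Int) : Int := l.foldl max 0

theorem pv_foldl_maxI_init (l : List Int) (a : Int) : a ≤ l.foldl max a := by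
  induction l generalizing a with
  | nil => simp
  | cons x t ih => exact le_trans (le_max_left a x) (ih (max a x))

theorem pv_le_maxI_gen {l : List Int} {x : Int} (a : Int) (hx : x ∈ l) : x ≤ l.foldl max a := by
  induction l generalizing a with
  | nil => cases hx
  | cons y t ih =>
    rcases List.mem_cons.mp hx with rfl | h
    · exact le_trans (le_max_right a x) (pv_foldl_maxI_init t (max a x))
    · exact ih (max a y) h

theorem pv_le_maxI {l : List Int} {x : Int} (hx : x ∈ l) : x ≤ pvMaxI l :=
  pv_le_maxI_gen 0 hx

theorem pv_maxI_le_gen {l : List Int} {a b : Int} (ha : a ≤ b) (h : ∀ x ∈ l, x ≤ b) :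
    l.foldl max a ≤ b := by
  induction l generalizing a with
  | nil => simpa
  | cons y t ih =>
    exact ih (max_le ha (h y List.mem_cons_self)) (fun x hx => h x (List.mem_cons_of_mem _ hx))

theorem pv_maxI_le {l : List Int} {b : Int} (hb : 0 ≤ b) (h : ∀ x ∈ l, x ≤ b) : pvMaxI l ≤ b :=
  pv_maxI_le_gen hb h

theorem pv_maxI_nonneg (l : List Int) : 0 ≤ pvMaxI l := pv_foldl_maxI_init l 0

theorem pv_maxI_congr {l l' : List Int} (h : ∀ x, x ∈ l ↔ x ∈ l') : pvMaxI l = pvMaxI l' :=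
  le_antisymm (pv_maxI_le (pv_maxI_nonneg l') (fun x hx => pv_le_maxI ((h x).mp hx)))
    (pv_maxI_le (pv_maxI_nonneg l) (fun x hx => pv_le_maxI ((h x).mpr hx)))

theorem pv_maxI_cast_gen (L : List Nat) (a : Nat) :
    (L.map (fun (n : Nat) => (n : Int))).foldl max (a : Int) = ((L.foldl max a : Nat) : Int) := by
  induction L generalizing a with
  | nil => simp
  | cons x t ih =>
    rw [List.map_cons, List.foldl_cons, List.foldl_cons,
      show (max (a : Int) (x : Int)) = ((max a x : Nat) : Int) from (Nat.cast_max a x).symm, ih]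

theorem pv_maxI_cast (L : List Nat) :
    pvMaxI (L.map (fun (n : Nat) => (n : Int))) = ((pvMaxN L : Nat) : Int) :=
  pv_maxI_cast_gen L 0

-- the inner max loop computes the DP value: every strict container was already filled in
theorem pv_best_eq (ns P rem' : List (String × Int × Int)) (t : String × Int × Int)
    (lv : PySem.Dict (Int × Int) Int)
    (hord : PySem.List.sorted ns (fun t => t.2.1 - t.2.2) false = P ++ t :: rem')
    (hnd : lv.keys.Nodup)
    (hkeys : ∀ q, q ∈ lv.keys ↔ q ∈ P.map pvSp)
    (hval : ∀ q v, (q, v) ∈ lv.items → v = (pvClev (ns.map pvSp) q : Int)) :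
    lv.items.foldl (fun b p => if pvInside (pvSp t) p.1 then max b (p.2 + 1) else b) 0
      = (pvClev (ns.map pvSp) (pvSp t) : Int) := by
  have hmemord : ∀ u : String × Int × Int, u ∈ ns ↔ u ∈ P ++ t :: rem' := by
    intro u
    rw [← hord, (PySem.List.sorted_perm ns (fun t => t.2.1 - t.2.2) false).mem_iff]
  have hcont : ∀ q ∈ ns.map pvSp, pvInside (pvSp t) q = true → q ∈ P.map pvSp := by
    intro q hq hins
    rcases List.mem_map.mp hq with ⟨u, hu, rfl⟩
    have hkey : (pvSp u).1 - (pvSp u).2 < (pvSp t).1 - (pvSp t).2 := pvInside_key hins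
    rcases List.mem_append.mp ((hmemord u).mp hu) with hP | hTr
    · exact List.mem_map_of_mem hP
    · exfalso
      have hpw := PySem.List.sorted_pairwise ns (fun t => t.2.1 - t.2.2)
      rw [hord] at hpw
      have hsub := hpw.sublist (List.sublist_append_right P (t :: rem'))
      rcases List.mem_cons.mp hTr with rfl | hrem
      · simp [pvSp] at hkey
      · have := (List.pairwise_cons.mp hsub).1 u hrem
        simp only [pvSp] at hkey
        omega
  rw [PySem.List.foldl_if_eq_foldl_filter (fun p => pvInside (pvSp t) p.1)
      (fun b p => max b (p.2 + 1)) lv.items 0,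
    ← List.foldl_map (f := fun p : (Int × Int) × Int => p.2 + 1) (g := fun (b x : Int) => max b x)]
  rw [pvClev_eq]
  rw [← pv_maxI_cast]
  show pvMaxI _ = pvMaxI _
  rw [List.map_map]
  apply pv_maxI_congr
  intro x
  constructor
  · intro hx
    rcases List.mem_map.mp hx with ⟨p, hp, rfl⟩
    obtain ⟨q, v⟩ := p
    have hitem : (q, v) ∈ lv.items := (List.mem_filter.mp hp).1
    have hins : pvInside (pvSp t) q = true := by simpa using (List.mem_filter.mp hp).2
    have hv := hval q v hitem
    have hqkeys : q ∈ lv.keys := PySem.Dict.mem_keys_of_mem_items lv hitem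
    have hqP : q ∈ P.map pvSp := (hkeys q).mp hqkeys
    have hqS : q ∈ ns.map pvSp := by
      rcases List.mem_map.mp hqP with ⟨u, hu, rfl⟩
      exact List.mem_map_of_mem ((hmemord u).mpr (List.mem_append_left _ hu))
    apply List.mem_map.mpr
    refine ⟨q, List.mem_filter.mpr ⟨hqS, hins⟩, ?_⟩
    simp [hv]
  · intro hx
    rcases List.mem_map.mp hx with ⟨q, hq, rfl⟩
    have hqS : q ∈ ns.map pvSp := (List.mem_filter.mp hq).1
    have hins : pvInside (pvSp t) q = true := (List.mem_filter.mp hq).2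
    have hqkeys : q ∈ lv.keys := (hkeys q).mpr (hcont q hqS hins)
    have hcontains : lv.contains q = true := (PySem.Dict.contains_iff_mem_keys lv q).mpr hqkeys
    rw [PySem.Dict.contains_eq_isSome_get?] at hcontains
    rcases Option.isSome_iff_exists.mp hcontains with ⟨v, hv⟩
    have hitem : (q, v) ∈ lv.items := (PySem.Dict.get?_eq_some_iff_mem_items lv q v hnd).mp hv
    apply List.mem_map.mpr
    refine ⟨(q, v), List.mem_filter.mpr ⟨hitem, by simpa using hins⟩, ?_⟩
    simp [hval q v hitem]

theorem pvLevels_inv (ns : List (String × Int × Int)) :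
    ∀ (rem P : List (String × Int × Int)) (lv : PySem.Dict (Int × Int) Int),
    PySem.List.sorted ns (fun t => t.2.1 - t.2.2) false = P ++ rem →
    lv.keys.Nodup →
    (∀ q, q ∈ lv.keys ↔ q ∈ P.map pvSp) →
    (∀ q v, (q, v) ∈ lv.items → v = (pvClev (ns.map pvSp) q : Int)) →
    ((rem.foldl (fun lv t =>
        lv.insert (pvSp t) (lv.items.foldl
          (fun b p => if pvInside (pvSp t) p.1 then max b (p.2 + 1) else b) 0)) lv).keys.Nodup ∧
     (∀ q, q ∈ (rem.foldl (fun lv t =>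
        lv.insert (pvSp t) (lv.items.foldl
          (fun b p => if pvInside (pvSp t) p.1 then max b (p.2 + 1) else b) 0)) lv).keys
        ↔ (q ∈ P.map pvSp ∨ q ∈ rem.map pvSp)) ∧
     (∀ q v, (q, v) ∈ (rem.foldl (fun lv t =>
        lv.insert (pvSp t) (lv.items.foldl
          (fun b p => if pvInside (pvSp t) p.1 then max b (p.2 + 1) else b) 0)) lv).items →
        v = (pvClev (ns.map pvSp) q : Int))) := by
  intro rem
  induction rem with
  | nil =>
    intro P lv hord hnd hkeys hval
    refine ⟨hnd, fun q => ?_, hval⟩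
    simp [hkeys q]
  | cons t rem' ih =>
    intro P lv hord hnd hkeys hval
    have hbest := pv_best_eq ns P rem' t lv hord hnd hkeys hval
    rw [List.foldl_cons]
    have hnd' := PySem.Dict.nodup_keys_insert lv (pvSp t) (lv.items.foldl
      (fun b p => if pvInside (pvSp t) p.1 then max b (p.2 + 1) else b) 0) hnd
    have hkeys' : ∀ q, q ∈ (lv.insert (pvSp t) (lv.items.foldl
        (fun b p => if pvInside (pvSp t) p.1 then max b (p.2 + 1) else b) 0)).keys
        ↔ q ∈ (P ++ [t]).map pvSp := by
      intro q
      rw [PySem.Dict.mem_keys_insert]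
      simp only [List.map_append, List.mem_append, List.map_cons, List.map_nil,
        List.mem_singleton]
      rw [hkeys q]
      tauto
    have hval' : ∀ q v, (q, v) ∈ (lv.insert (pvSp t) (lv.items.foldl
        (fun b p => if pvInside (pvSp t) p.1 then max b (p.2 + 1) else b) 0)).items →
        v = (pvClev (ns.map pvSp) q : Int) := by
      intro q v hqv
      rcases (PySem.Dict.mem_items_insert lv _ _ (q, v)).mp hqv with heq | ⟨hmem, _⟩
      · obtain ⟨h1, h2⟩ := Prod.mk.injEq .. ▸ heq
        subst h1
        rw [h2, hbest]
      · exact hval q v hmem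
    have := ih (P ++ [t]) _ (by rw [hord, List.append_assoc]; rfl) hnd' hkeys' hval'
    refine ⟨this.1, fun q => ?_, this.2.2⟩
    rw [(this.2.1 q)]
    simp only [List.map_append, List.mem_append, List.map_cons, List.map_nil, List.mem_cons]
    tauto

theorem pv_pyRange_cast (M : Nat) :
    PySem.List.pyRange 1 ((M : Int) + 1) 1 = (List.range M).map (fun (k : Nat) => ((k : Int) + 1)) := by
  induction M with
  | zero => simp [PySem.List.pyRange]
  | succ m ih =>
    have hcast : ((m + 1 : Nat) : Int) + 1 = ((m : Int) + 1) + 1 := by push_cast; ring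
    rw [hcast, PySem.List.pyRange_one_append 1 ((m : Int) + 1) (((m : Int) + 1) + 1) (by omega)
      (by omega), ih, List.range_succ, List.map_append]
    congr 1
    rw [PySem.List.pyRange_one_cons (by omega)]
    have hnil : PySem.List.pyRange ((m : Int) + 1 + 1) ((m : Int) + 1 + 1) = [] := by
      simp [PySem.List.pyRange]
    rw [hnil]
    simp

theorem pvLevels_eq (order : List (String × Int × Int)) :
    pvLevels order = order.foldl (fun lv t =>
      lv.insert (pvSp t) (lv.items.foldl
        (fun b p => if pvInside (pvSp t) p.1 then max b (p.2 + 1) else b) 0)) PySem.Dict.empty :=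
  rfl

-- what pvLevels knows at the end of the DP pass
theorem pvLevels_post (ns : List (String × Int × Int)) :
    (pvLevels (PySem.List.sorted ns (fun t => t.2.1 - t.2.2) false)).keys.Nodup ∧
    (∀ q, q ∈ (pvLevels (PySem.List.sorted ns (fun t => t.2.1 - t.2.2) false)).keys
      ↔ q ∈ ns.map pvSp) ∧
    (∀ q v, (q, v) ∈ (pvLevels (PySem.List.sorted ns (fun t => t.2.1 - t.2.2) false)).items →
      v = (pvClev (ns.map pvSp) q : Int)) := by
  have h := pvLevels_inv ns (PySem.List.sorted ns (fun t => t.2.1 - t.2.2) false) []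
    PySem.Dict.empty (by simp) (by simp [PySem.Dict.empty, PySem.Dict.keys])
    (by simp [PySem.Dict.empty, PySem.Dict.keys]) (by simp [PySem.Dict.empty])
  rw [pvLevels_eq]
  refine ⟨h.1, fun q => ?_, h.2.2⟩
  rw [h.2.1 q]
  simp only [List.map_nil, List.not_mem_nil, false_or]
  constructor
  · intro hq
    rcases List.mem_map.mp hq with ⟨u, hu, rfl⟩
    exact List.mem_map_of_mem
      ((PySem.List.sorted_perm ns (fun t => t.2.1 - t.2.2) false).subset hu)
  · intro hq
    rcases List.mem_map.mp hq with ⟨u, hu, rfl⟩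
    exact List.mem_map_of_mem
      ((PySem.List.sorted_perm ns (fun t => t.2.1 - t.2.2) false).mem_iff.mpr hu)

theorem pvLevels_getD (ns : List (String × Int × Int)) (e : String × Int × Int) (he : e ∈ ns) :
    (pvLevels (PySem.List.sorted ns (fun t => t.2.1 - t.2.2) false)).getD (pvSp e) 0
      = (pvClevE ns e : Int) := by
  obtain ⟨hnd, hkeys, hval⟩ := pvLevels_post ns
  have hq : pvSp e ∈ (pvLevels (PySem.List.sorted ns (fun t => t.2.1 - t.2.2) false)).keys :=
    (hkeys (pvSp e)).mpr (List.mem_map_of_mem he)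
  have hcontains := (PySem.Dict.contains_iff_mem_keys _ (pvSp e)).mpr hq
  rw [PySem.Dict.contains_eq_isSome_get?] at hcontains
  rcases Option.isSome_iff_exists.mp hcontains with ⟨v, hv⟩
  rw [PySem.Dict.getD_of_get?_eq_some _ 0 hv]
  exact hval (pvSp e) v ((PySem.Dict.get?_eq_some_iff_mem_items _ _ _ hnd).mp hv)

theorem pvLevels_filter0 (ns : List (String × Int × Int)) :
    ns.filter (fun t =>
        (pvLevels (PySem.List.sorted ns (fun t => t.2.1 - t.2.2) false)).getD (pvSp t) 0
          == (0 : Int))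
      = pvA0 ns := by
  apply List.filter_congr
  intro t ht
  rw [pvLevels_getD ns t ht]
  simp [Bool.beq_eq_decide_eq]

theorem pvLevels_filterk (ns : List (String × Int × Int)) (k : Nat) :
    ns.filter (fun t =>
        (pvLevels (PySem.List.sorted ns (fun t => t.2.1 - t.2.2) false)).getD (pvSp t) 0
          == ((k : Int) + 1))
      = ns.filter (fun e => pvClevE ns e == k + 1) := by
  apply List.filter_congr
  intro t ht
  rw [pvLevels_getD ns t ht]
  simp only [Bool.beq_eq_decide_eq]
  rw [show ((k : Int) + 1) = ((k + 1 : Nat) : Int) by push_cast; ring]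
  simp only [decide_eq_decide]
  omega

theorem pvLevels_maxlv (ns : List (String × Int × Int)) (hns : ns ≠ []) :
    (PySem.List.max? (pvLevels (PySem.List.sorted ns (fun t => t.2.1 - t.2.2) false)).values
        (fun v => v)).getD 0
      = ((pvMaxN (ns.map (pvClevE ns)) : Nat) : Int) := by
  obtain ⟨hnd, hkeys, hval⟩ := pvLevels_post ns
  have hvalues : (pvLevels (PySem.List.sorted ns (fun t => t.2.1 - t.2.2) false)).values
      = (pvLevels (PySem.List.sorted ns (fun t => t.2.1 - t.2.2) false)).items.map (·.2) := rfl
  -- the dict is nonempty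
  rcases List.ne_nil_iff_exists_cons.mp hns with ⟨e0, t0, rfl⟩
  have hq0 : pvSp e0 ∈ (pvLevels (PySem.List.sorted (e0 :: t0) (fun t => t.2.1 - t.2.2) false)).keys :=
    (hkeys (pvSp e0)).mpr (List.mem_map_of_mem List.mem_cons_self)
  have hitems_ne : (pvLevels (PySem.List.sorted (e0 :: t0) (fun t => t.2.1 - t.2.2) false)).items ≠ [] := by
    intro hnil
    rw [PySem.Dict.keys, hnil] at hq0
    simp at hq0
  have hvne : (pvLevels (PySem.List.sorted (e0 :: t0) (fun t => t.2.1 - t.2.2) false)).values ≠ [] := by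
    rw [hvalues]
    simpa using hitems_ne
  have hsome : (PySem.List.max? (pvLevels (PySem.List.sorted (e0 :: t0) (fun t => t.2.1 - t.2.2) false)).values
      (fun v => v)).isSome := by
    cases hmx : PySem.List.max? (pvLevels (PySem.List.sorted (e0 :: t0) (fun t => t.2.1 - t.2.2) false)).values
        (fun v => v) with
    | none => exact absurd ((PySem.List.max?_eq_none_iff _ _).mp hmx) hvne
    | some m => rfl
  rcases Option.isSome_iff_exists.mp hsome with ⟨m, hm⟩
  rw [hm, Option.getD_some]
  have hmval : ∀ v ∈ (pvLevels (PySem.List.sorted (e0 :: t0) (fun t => t.2.1 - t.2.2) false)).values,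
      ∃ e ∈ (e0 :: t0), v = (pvClevE (e0 :: t0) e : Int) := by
    intro v hvmem
    rw [hvalues] at hvmem
    rcases List.mem_map.mp hvmem with ⟨p, hp, rfl⟩
    obtain ⟨q, v⟩ := p
    have hqk : q ∈ (pvLevels (PySem.List.sorted (e0 :: t0) (fun t => t.2.1 - t.2.2) false)).keys :=
      PySem.Dict.mem_keys_of_mem_items _ hp
    rcases List.mem_map.mp ((hkeys q).mp hqk) with ⟨e, he, rfl⟩
    exact ⟨e, he, hval (pvSp e) v hp⟩
  apply le_antisymm
  · rcases hmval m (PySem.List.max?_mem hm) with ⟨e, he, rfl⟩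
    have : pvClevE (e0 :: t0) e ≤ pvMaxN ((e0 :: t0).map (pvClevE (e0 :: t0))) :=
      pv_le_maxN (List.mem_map_of_mem he)
    omega
  · rcases pv_maxN_mem_or ((e0 :: t0).map (pvClevE (e0 :: t0))) with h0 | hmem
    · rw [h0]
      rcases hmval m (PySem.List.max?_mem hm) with ⟨e, he, rfl⟩
      positivity
    · rcases List.mem_map.mp hmem with ⟨e1, he1, heq⟩
      have hq1 : pvSp e1 ∈ (pvLevels (PySem.List.sorted (e0 :: t0) (fun t => t.2.1 - t.2.2) false)).keys :=
        (hkeys (pvSp e1)).mpr (List.mem_map_of_mem he1)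
      have hcontains := (PySem.Dict.contains_iff_mem_keys _ (pvSp e1)).mpr hq1
      rw [PySem.Dict.contains_eq_isSome_get?] at hcontains
      rcases Option.isSome_iff_exists.mp hcontains with ⟨v, hv⟩
      have hitem := (PySem.Dict.get?_eq_some_iff_mem_items _ _ _ hnd).mp hv
      have hveq : v = (pvClevE (e0 :: t0) e1 : Int) := hval (pvSp e1) v hitem
      have hvmem : v ∈ (pvLevels (PySem.List.sorted (e0 :: t0) (fun t => t.2.1 - t.2.2) false)).values := by
        rw [hvalues]
        exact List.mem_map_of_mem hitem
      have := PySem.List.max?_isMax hm v hvmem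
      rw [hveq, heq] at this
      simpa using this

-- the whole body of B's loop, as a function of the nesting
theorem pvStepB_eq (st : List (String × Int × Int) × List (String × Int × Int) × Bool)
    (ns : List (String × Int × Int)) :
    pvStepB st ns = if ns = [] then st else (st.1 ++ pvA0 ns, st.2.1 ++ pvA1 ns, true) := by
  by_cases hns : ns = []
  · subst hns
    simp [pvStepB]
  · rw [pvStepB, if_neg (by simpa [List.length_eq_zero_iff] using hns), if_neg hns]
    have h0 := pvLevels_filter0 ns
    have hmx := pvLevels_maxlv ns hns
    simp only []
    rw [h0, hmx, pv_pyRange_cast, PySem.List.foldl_append_eq_flatMap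
      (fun l => ns.filter (fun t =>
        (pvLevels (PySem.List.sorted ns (fun t => t.2.1 - t.2.2) false)).getD (pvSp t) 0 == l))]
    congr 2
    rw [List.flatMap_map]
    rw [pvA1, ← List.flatMap_def]
    congr 1
    apply List.flatMap_congr
    intro k _
    exact pvLevels_filterk ns k

-- ---- assembling the two folds ----

-- the accumulator dictionary of A, as a function of B's two output lists
def pvRepr (o0 o1 : List (String × Int × Int)) : PySem.Dict Int (List (String × Int × Int)) :=
  if o0 = [] then PySem.Dict.empty
  else if o1 = [] then PySem.Dict.mk [((0 : Int), o0)]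
  else PySem.Dict.mk [((0 : Int), o0), ((1 : Int), o1)]

theorem pvA0_ne (ns : List (String × Int × Int)) (hns : ns ≠ []) : pvA0 ns ≠ [] := by
  rcases pvClev_exists_zero (ns.map pvSp) (by simpa using hns) with ⟨q, hq, hq0⟩
  rcases List.mem_map.mp hq with ⟨e0, he0, rfl⟩
  intro hnil
  have : e0 ∈ pvA0 ns := List.mem_filter.mpr ⟨he0, by simp [pvClevE, hq0]⟩
  simp [hnil] at this

theorem pvReprStep (o0 o1 A0 A1 : List (String × Int × Int)) (hA0 : A0 ≠ [])
    (h01 : o0 = [] → o1 = []) :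
    (if A1 = [] then (pvRepr o0 o1).modify 0 [] (· ++ A0)
     else ((pvRepr o0 o1).modify 0 [] (· ++ A0)).modify 1 [] (· ++ A1))
      = pvRepr (o0 ++ A0) (o1 ++ A1) := by
  by_cases h0 : o0 = []
  · have h1 : o1 = [] := h01 h0
    subst h0; subst h1
    by_cases hA1 : A1 = [] <;>
      simp [hA1, pvRepr, hA0, PySem.Dict.modify, PySem.Dict.insert, PySem.Dict.contains,
        PySem.Dict.getD, PySem.Dict.get?, PySem.Dict.empty]
  · by_cases h1 : o1 = []
    · subst h1
      by_cases hA1 : A1 = [] <;>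
        simp [hA1, pvRepr, h0, hA0, PySem.Dict.modify, PySem.Dict.insert, PySem.Dict.contains,
          PySem.Dict.getD, PySem.Dict.get?]
    · by_cases hA1 : A1 = [] <;>
        simp [hA1, pvRepr, h0, h1, hA0, PySem.Dict.modify, PySem.Dict.insert,
          PySem.Dict.contains, PySem.Dict.getD, PySem.Dict.get?]

theorem pv_outer (L : List (List (String × Int × Int))) :
    ∀ (npl : PySem.Dict Int (List (String × Int × Int)))
      (st : List (String × Int × Int) × List (String × Int × Int) × Bool),
    npl = pvRepr st.1 st.2.1 → (st.2.2 = false ↔ st.1 = []) → (st.1 = [] → st.2.1 = []) →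
    (L.foldl (fun npl nesting =>
        pvCollect npl (pvPeel nesting.length nesting 0 PySem.Dict.empty)) npl
      = pvRepr (L.foldl pvStepB st).1 (L.foldl pvStepB st).2.1) ∧
    ((L.foldl pvStepB st).2.2 = false ↔ (L.foldl pvStepB st).1 = []) ∧
    ((L.foldl pvStepB st).1 = [] → (L.foldl pvStepB st).2.1 = []) := by
  induction L with
  | nil => intro npl st h1 h2 h3; exact ⟨h1, h2, h3⟩
  | cons ns L ih =>
    intro npl st h1 h2 h3
    rw [List.foldl_cons, List.foldl_cons, pvStepA npl ns, pvStepB_eq st ns]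
    by_cases hns : ns = []
    · rw [if_pos hns, if_pos hns]
      exact ih npl st h1 h2 h3
    · rw [if_neg hns, if_neg hns]
      have hA0 := pvA0_ne ns hns
      apply ih
      · rw [h1, pvReprStep st.1 st.2.1 (pvA0 ns) (pvA1 ns) hA0 h3]
      · constructor
        · intro hfalse; cases hfalse
        · intro hnil
          exact absurd hnil (List.append_ne_nil_of_right_ne_nil st.1 hA0)
      · intro hnil
        exact absurd hnil (List.append_ne_nil_of_right_ne_nil st.1 hA0)

-- ===== VERDICT (by name: the statement is the Claim_ definition above) =====
theorem get_nestings_per_level_spec : Claim_equal_get_nestings_per_level := by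
  intro nestings _
  unfold Spec_get_nestings_per_level
  obtain ⟨h1, h2, h3⟩ := pv_outer nestings PySem.Dict.empty ([], [], false)
    (by simp [pvRepr]) (by simp) (by simp)
  rw [get_nestings_per_level, get_nestings_per_level_alt]
  rw [h1]
  by_cases h0 : (nestings.foldl pvStepB ([], [], false)).1 = []
  · rw [if_pos (h2.mpr h0), pvRepr, if_pos h0]
    rfl
  · rw [if_neg (by simpa [h2] using h0)]
    by_cases ho1 : (nestings.foldl pvStepB ([], [], false)).2.1 = []
    · rw [pvRepr, if_neg h0, if_pos ho1, if_pos (by simpa using ho1)]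
      simp [PySem.Dict.insert, PySem.Dict.contains, PySem.Dict.empty]
    · rw [pvRepr, if_neg h0, if_neg ho1, if_neg (by simpa using ho1)]
      simp [PySem.Dict.insert, PySem.Dict.contains, PySem.Dict.empty]
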